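-- pv_equiv track=rewrite | github.com/ni-lie/CS199-TreePoset | Utils/TreePoset_Utils_v2.py | intersection_difference
-- ===== SOURCE A (Python) =====
-- def getDifference(P1, P2):
--     return [x for x in P1 if x not in P2]
--
-- def intersection_difference(Pstar):
--     intersection = Pstar[0].copy()
--
--     difference = []
--     union = []
--     for poset in Pstar[1:]:
--         not_intersection = []
--         for relation in intersection:
--             if relation not in poset:
--                 not_intersection.append(relation)
--
--         for relation in not_intersection:
--             intersection.remove(relation)
--
--     for poset in Pstar:
--         union += poset
--     union = sorted(list(set(union)))
--     difference = getDifference(union, intersection)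
--     return (intersection, difference)
-- ===== SOURCE B (Python) =====
-- def intersection_difference(Pstar):
--     n = len(Pstar)
--     counts = {}
--     for poset in Pstar:
--         for x in set(poset):
--             counts[x] = counts.get(x, 0) + 1
--     intersection = [x for x in Pstar[0] if counts.get(x, 0) == n]
--     difference = [x for x in sorted(counts) if counts[x] < n]
--     return (intersection, difference)
-- ===== Notes on version B (the rewrite author's own statement) =====
-- stated objective: alternative
-- what changed: Replaces the per-poset removal loop (membership scans plus list.remove) and the separate union accumulation with one frequency table built in a single combined pass (+1 per poset per distinct element), then classifies elements against the threshold len(Pstar): intersection = copies of Pstar[0] with full count, difference = sorted keys with count below it.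
import Mathlib
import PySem

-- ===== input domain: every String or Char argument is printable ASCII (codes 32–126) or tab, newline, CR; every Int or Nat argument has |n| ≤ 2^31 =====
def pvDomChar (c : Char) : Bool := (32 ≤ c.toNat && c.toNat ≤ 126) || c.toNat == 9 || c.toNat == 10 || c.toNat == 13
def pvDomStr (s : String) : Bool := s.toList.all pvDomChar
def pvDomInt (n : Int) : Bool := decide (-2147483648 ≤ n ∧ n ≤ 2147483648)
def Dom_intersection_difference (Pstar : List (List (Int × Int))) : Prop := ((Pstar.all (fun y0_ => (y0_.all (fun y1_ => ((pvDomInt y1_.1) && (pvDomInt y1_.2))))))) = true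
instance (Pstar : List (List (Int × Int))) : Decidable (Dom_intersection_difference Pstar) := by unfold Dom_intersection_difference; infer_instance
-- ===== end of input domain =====

-- B replaces A's per-poset removal loop and union accumulation with one counting
-- pass plus a threshold classification against len(Pstar).

-- ===== PORT A =====
def getDifference (P1 P2 : List (Int × Int)) : List (Int × Int) :=
  P1.filter (fun x => !decide (x ∈ P2))

-- list.remove(v): Python raises ValueError when v is absent; in this function every
-- removed element is present, so the 'none' branch below is unreachable (it only
-- makes the fold total, it never changes the computed value on an admitted input).
def pyRemove (xs : List (Int × Int)) (v : Int × Int) : List (Int × Int) :=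
  match PySem.List.remove? xs v with
  | some l => l
  | none => xs

def intersection_difference (Pstar : List (List (Int × Int))) : (List (Int × Int)) × (List (Int × Int)) :=
  match PySem.List.pyGet? Pstar 0 with
  | none => ([], [])  -- Pstar[0] raises IndexError on empty input: excluded by Pre_
  | some first =>
    let intersection := (PySem.List.slice Pstar (some 1) none).foldl
      (fun intersection poset =>
        let not_intersection := intersection.foldl
          (fun acc relation => if decide (relation ∉ poset) then acc ++ [relation] else acc) []
        not_intersection.foldl (fun inter relation => pyRemove inter relation) intersection)
      first
    let union := Pstar.foldl (fun u poset => u ++ poset) []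
    let sortedUnion := PySem.List.sorted2 (PySem.Set.ofList union) Prod.fst Prod.snd false
    (intersection, getDifference sortedUnion intersection)

-- ===== PORT B =====
def intersection_difference_alt (Pstar : List (List (Int × Int))) : (List (Int × Int)) × (List (Int × Int)) :=
  let n : Int := Pstar.length
  let counts := Pstar.foldl
    (fun counts poset => (PySem.Set.ofList poset).foldl
      (fun counts x => counts.insert x (counts.getD x 0 + 1)) counts)
    PySem.Dict.empty
  match PySem.List.pyGet? Pstar 0 with
  | none => ([], [])  -- Pstar[0] raises IndexError on empty input: excluded by Pre_
  | some first =>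
    (first.filter (fun x => decide (counts.getD x 0 = n)),
     (PySem.List.sorted2 counts.keys Prod.fst Prod.snd false).filter
       (fun x => decide (counts.getD x 0 < n)))

-- ===== PRECONDITION & SPEC =====
-- Pre_ excludes only the empty list, on which Pstar[0] raises IndexError in both programs.
def Pre_intersection_difference (Pstar : List (List (Int × Int))) : Prop := Pstar ≠ []
instance (Pstar : List (List (Int × Int))) : Decidable (Pre_intersection_difference Pstar) := by
  unfold Pre_intersection_difference; infer_instance

def pvWitness_intersection_difference : (List (List (Int × Int))) := [[(1, 2), (2, 3)], [(2, 3)]]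

def Spec_intersection_difference (Pstar : List (List (Int × Int))) (out : (List (Int × Int)) × (List (Int × Int))) : Prop := out = intersection_difference_alt Pstar
instance (Pstar : List (List (Int × Int))) (out : (List (Int × Int)) × (List (Int × Int))) : Decidable (Spec_intersection_difference Pstar out) := by unfold Spec_intersection_difference; infer_instance

-- ===== CLAIM (what is proved, stated in full; the proofs are below) =====
def Claim_equal_intersection_difference : Prop := ∀ (Pstar : List (List (Int × Int))), Dom_intersection_difference Pstar → Pre_intersection_difference Pstar → Spec_intersection_difference Pstar (intersection_difference Pstar)

-- ===== LEMMAS AND PROOFS =====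

-- Removing elements not equal to the head leaves the head in place.
theorem removeAll_cons_of_not_mem (L : List (Int × Int)) (x : Int × Int)
    (xs : List (Int × Int)) (h : x ∉ L) :
    L.foldl (fun inter r => pyRemove inter r) (x :: xs)
      = x :: L.foldl (fun inter r => pyRemove inter r) xs := by
  induction L generalizing xs with
  | nil => rfl
  | cons r L' ih =>
    have hxr : x ≠ r := fun he => h (he ▸ List.mem_cons_self)
    have hL' : x ∉ L' := fun hm => h (List.mem_cons_of_mem _ hm)
    simp only [List.foldl_cons]
    have hrem : pyRemove (x :: xs) r = x :: pyRemove xs r := by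
      unfold pyRemove
      rw [PySem.List.remove?_cons_of_ne _ hxr]
      cases PySem.List.remove? xs r <;> simp
    rw [hrem, ih _ hL']

-- Python's remove-loop over the complement of a filter computes the filter.
theorem removeAll_filter (l : List (Int × Int)) (p : (Int × Int) → Bool) :
    (l.filter (fun x => !p x)).foldl (fun inter r => pyRemove inter r) l = l.filter p := by
  induction l with
  | nil => rfl
  | cons x xs ih =>
    by_cases hp : p x = true
    · have hfil : (x :: xs).filter (fun x => !p x) = xs.filter (fun x => !p x) := by
        simp [hp]
      have hnm : x ∉ xs.filter (fun x => !p x) := by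
        intro hm
        have := List.of_mem_filter hm
        simp [hp] at this
      rw [hfil, removeAll_cons_of_not_mem _ _ _ hnm, ih]
      simp [hp]
    · have hfil : (x :: xs).filter (fun x => !p x) = x :: xs.filter (fun x => !p x) := by
        simp [hp]
      rw [hfil]
      simp only [List.foldl_cons]
      have hrm : pyRemove (x :: xs) x = xs := by
        unfold pyRemove; rw [PySem.List.remove?_cons_self]
      rw [hrm, ih]
      simp [hp]

-- One pass of A's outer loop intersects with the current poset.
theorem step_eq_filter (inter poset : List (Int × Int)) :
    ((inter.foldl (fun acc relation => if decide (relation ∉ poset) then acc ++ [relation] else acc) []).foldl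
        (fun i relation => pyRemove i relation) inter)
      = inter.filter (fun x => decide (x ∈ poset)) := by
  have h1 := PySem.List.foldl_append_if (fun r : Int × Int => decide (r ∉ poset)) id inter []
  simp only [id_eq, List.map_id, List.nil_append] at h1
  rw [h1]
  have h2 : (List.filter (fun r : Int × Int => decide (r ∉ poset)) inter)
      = List.filter (fun r : Int × Int => !decide (r ∈ poset)) inter :=
    List.filter_congr (fun x _ => by simp)
  rw [h2, removeAll_filter]

-- Folding the intersection step over all posets filters by membership in each.
theorem foldl_filter_all (rest : List (List (Int × Int))) (first : List (Int × Int)) :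
    rest.foldl (fun inter poset => inter.filter (fun x => decide (x ∈ poset))) first
      = first.filter (fun x => rest.all (fun poset => decide (x ∈ poset))) := by
  induction rest generalizing first with
  | nil => simp
  | cons p rest ih =>
    simp only [List.foldl_cons]
    rw [ih, List.filter_filter]
    exact List.filter_congr (fun x _ => by simp [Bool.and_comm])

-- The count stored for x is the number of posets containing x.
theorem getD_counts (Pstar : List (List (Int × Int))) (d : PySem.Dict (Int × Int) Int)
    (x : Int × Int) :
    (Pstar.foldl
        (fun counts poset => (PySem.Set.ofList poset).foldl
          (fun counts y => counts.insert y (counts.getD y 0 + 1)) counts) d).getD x 0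
      = d.getD x 0 + (Pstar.countP (fun poset => decide (x ∈ poset)) : Int) := by
  induction Pstar generalizing d with
  | nil => simp
  | cons p rest ih =>
    simp only [List.foldl_cons]
    rw [ih]
    have hcnt : List.count x (PySem.Set.ofList p) = if decide (x ∈ p) then 1 else 0 := by
      by_cases hx : x ∈ p
      · simp only [hx, decide_true, if_true]
        exact List.count_eq_one_of_mem (PySem.Set.nodup_ofList p)
          ((PySem.Set.mem_ofList p x).mpr hx)
      · simp only [hx, decide_false]
        exact List.count_eq_zero.mpr (fun hm => hx ((PySem.Set.mem_ofList p x).mp hm))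
    rw [PySem.Dict.getD_foldl_insert_add_one, hcnt, List.countP_cons]
    by_cases hx : x ∈ p
    · simp only [hx, decide_true, if_true]
      push_cast
      ring
    · simp only [hx, decide_false]
      push_cast
      ring

-- update with a deduplicated list is update with the list itself.
theorem update_ofList (s : PySem.Set (Int × Int)) (p : List (Int × Int)) :
    PySem.Set.update s (PySem.Set.ofList p) = PySem.Set.update s p := by
  rw [PySem.Set.update_eq_append_filter, PySem.Set.update_eq_append_filter,
    PySem.Set.ofList_ofList]

-- The keys of the counting dict are the distinct union elements in first-occurrence order.
theorem keys_counts (Pstar : List (List (Int × Int))) (d : PySem.Dict (Int × Int) Int) :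
    (Pstar.foldl
        (fun counts poset => (PySem.Set.ofList poset).foldl
          (fun counts y => counts.insert y (counts.getD y 0 + 1)) counts) d).keys
      = PySem.Set.update d.keys Pstar.flatten := by
  induction Pstar generalizing d with
  | nil => simp [PySem.Set.update]
  | cons p rest ih =>
    simp only [List.foldl_cons, List.flatten_cons]
    rw [ih, PySem.Dict.keys_foldl_insert, update_ofList, PySem.Set.update_append]

-- A's union accumulation is flatten.
theorem foldl_append_flatten (l : List (List (Int × Int))) (acc : List (Int × Int)) :
    l.foldl (fun u poset => u ++ poset) acc = acc ++ l.flatten := by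
  induction l generalizing acc with
  | nil => simp
  | cons p rest ih => simp [ih, List.append_assoc]

-- ===== VERDICT (by name: the statement is the Claim_ definition above) =====
theorem intersection_difference_spec : Claim_equal_intersection_difference := by
  intro Pstar _ hPre
  obtain ⟨first, rest, rfl⟩ := List.exists_cons_of_ne_nil hPre
  unfold Spec_intersection_difference intersection_difference intersection_difference_alt
  have hget : PySem.List.pyGet? (first :: rest) (0 : Int) = some first := by
    rw [show (0 : Int) = ((0 : Nat) : Int) from rfl, PySem.List.pyGet?_natCast]
    rfl
  rw [hget]
  simp only
  -- common facts
  set counts := (first :: rest).foldl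
      (fun counts poset => (PySem.Set.ofList poset).foldl
        (fun counts x => counts.insert x (counts.getD x 0 + 1)) counts)
      (PySem.Dict.empty : PySem.Dict (Int × Int) Int) with hcounts
  have hgd : ∀ x, counts.getD x 0 = ((first :: rest).countP (fun poset => decide (x ∈ poset)) : Int) := by
    intro x
    rw [hcounts, getD_counts]
    simp [PySem.Dict.getD_empty]
  -- intersection sides
  have hslice : PySem.List.slice (first :: rest) (some 1) none = rest := by
    rw [PySem.List.slice_from _ (by norm_num)]
    simp
  have hA : ((PySem.List.slice (first :: rest) (some 1) none).foldl
      (fun intersection poset =>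
        (intersection.foldl
          (fun acc relation => if decide (relation ∉ poset) then acc ++ [relation] else acc) []).foldl
          (fun inter relation => pyRemove inter relation) intersection)
      first) = first.filter (fun x => rest.all (fun poset => decide (x ∈ poset))) := by
    rw [hslice]
    have : (fun (intersection : List (Int × Int)) (poset : List (Int × Int)) =>
        (intersection.foldl
          (fun acc relation => if decide (relation ∉ poset) then acc ++ [relation] else acc) []).foldl
          (fun inter relation => pyRemove inter relation) intersection)
        = fun intersection poset => intersection.filter (fun x => decide (x ∈ poset)) := by
      funext inter poset
      exact step_eq_filter inter poset
    rw [this, foldl_filter_all]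
  rw [hA]
  have hinterBA : first.filter (fun x => rest.all (fun poset => decide (x ∈ poset)))
      = first.filter (fun x => decide (counts.getD x 0 = ((first :: rest).length : Int))) := by
    apply List.filter_congr
    intro x hx
    rw [hgd x]
    have hcp : (first :: rest).countP (fun poset => decide (x ∈ poset))
        = rest.countP (fun poset => decide (x ∈ poset)) + 1 := by
      rw [List.countP_cons]
      simp [hx]
    rw [hcp]
    have hiff : (rest.all (fun poset => decide (x ∈ poset)) = true)
        ↔ (rest.countP (fun poset => decide (x ∈ poset)) = rest.length) := by
      rw [List.all_eq_true, List.countP_eq_length]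
    rw [Bool.eq_iff_iff, hiff, decide_eq_true_eq]
    simp only [List.length_cons]
    omega
  -- difference sides
  have hunion : ((first :: rest).foldl (fun u poset => u ++ poset) [])
      = (first :: rest).flatten := by
    rw [foldl_append_flatten]; simp
  have hkeys : counts.keys = PySem.Set.ofList ((first :: rest).flatten) := by
    rw [hcounts, keys_counts]
    simp [PySem.Set.update_nil_left]
  have hmemA : ∀ x, (x ∈ first.filter (fun y => rest.all (fun poset => decide (y ∈ poset))))
      ↔ ((first :: rest).countP (fun poset => decide (x ∈ poset)) = (first :: rest).length) := by
    intro x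
    rw [List.mem_filter, List.countP_eq_length]
    constructor
    · rintro ⟨hxf, hall⟩
      intro p hp
      rcases List.mem_cons.mp hp with rfl | hp'
      · simpa using hxf
      · exact (List.all_eq_true.mp hall) p hp'
    · intro h
      refine ⟨by simpa using h first List.mem_cons_self, ?_⟩
      exact List.all_eq_true.mpr (fun p hp => h p (List.mem_cons_of_mem _ hp))
  have hdiff : getDifference
      (PySem.List.sorted2 (PySem.Set.ofList ((first :: rest).foldl (fun u poset => u ++ poset) []))
        Prod.fst Prod.snd false)
      (first.filter (fun x => rest.all (fun poset => decide (x ∈ poset))))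
      = (PySem.List.sorted2 counts.keys Prod.fst Prod.snd false).filter
        (fun x => decide (counts.getD x 0 < ((first :: rest).length : Int))) := by
    rw [hunion, hkeys]
    unfold getDifference
    apply List.filter_congr
    intro x _
    rw [hgd x, Bool.eq_iff_iff, Bool.not_eq_true', decide_eq_false_iff_not, decide_eq_true_eq,
      hmemA x]
    have hle := List.countP_le_length (p := fun poset => decide (x ∈ poset)) (l := first :: rest)
    omega
  rw [hdiff, hinterBA]
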